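-- pv_equiv track=rewrite | github.com/thesouthernlion/how_to_easily_solve_optimen_challenge2 | main.py | trip_index_list_creator_2
-- ===== SOURCE A (Python) =====
-- def trip_index_list_creator_2(List):
--   indexList = []
--   counter_line = 0
--   for item in List:
--     if (item[2] != '"BIDGROUP"'):
--       counter_line += 1
--       indexList.append(counter_line)
--     elif (item[2] == '"BIDGROUP"'):
--       counter_line = 0
--
--   return indexList
-- ===== SOURCE B (Python) =====
-- def trip_index_list_creator_2(List):
--   # Segment-then-enumerate: skip BIDGROUP rows, and for each maximal run of
--   # non-BIDGROUP rows emit 1..len(run), instead of a running counter with reset.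
--   indexList = []
--   i = 0
--   n = len(List)
--   while i < n:
--     if List[i][2] == '"BIDGROUP"':
--       i += 1
--     else:
--       j = i
--       while j < n and List[j][2] != '"BIDGROUP"':
--         j += 1
--       indexList.extend(range(1, j - i + 1))
--       i = j
--   return indexList
-- ===== Notes on version B (the rewrite author's own statement) =====
-- stated objective: alternative
-- what changed: Replaced the running counter that resets on BIDGROUP by a segment scan: skip BIDGROUP rows and, for each maximal run of non-BIDGROUP rows, extend the result with range(1, len(run)+1).
import Mathlib
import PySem

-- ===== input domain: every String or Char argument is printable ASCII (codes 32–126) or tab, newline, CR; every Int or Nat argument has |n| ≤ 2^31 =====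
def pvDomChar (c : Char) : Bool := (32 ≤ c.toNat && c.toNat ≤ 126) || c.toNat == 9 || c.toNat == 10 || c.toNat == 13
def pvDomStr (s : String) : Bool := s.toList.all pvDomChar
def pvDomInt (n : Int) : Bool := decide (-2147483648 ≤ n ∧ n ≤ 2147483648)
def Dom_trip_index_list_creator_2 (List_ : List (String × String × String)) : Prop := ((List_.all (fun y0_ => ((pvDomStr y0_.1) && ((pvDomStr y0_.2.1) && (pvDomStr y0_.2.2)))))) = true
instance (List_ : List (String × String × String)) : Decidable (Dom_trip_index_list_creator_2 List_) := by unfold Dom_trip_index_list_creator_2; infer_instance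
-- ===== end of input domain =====

-- B replaces A's running counter (reset on BIDGROUP) by a segment scan emitting
-- range(1, len(run)+1) per maximal non-BIDGROUP run; alternative decomposition, same O(n) cost.

-- ===== PORT A =====
-- A: one pass with state (indexList, counter_line); counter resets on '"BIDGROUP"'.
def trip_index_list_creator_2 (List_ : List (String × String × String)) : List Int :=
  (List_.foldl
    (fun (st : List Int × Int) item =>
      if item.2.2 != "\"BIDGROUP\"" then (st.1 ++ [st.2 + 1], st.2 + 1)
      else (st.1, (0 : Int)))
    ([], 0)).1

-- ===== PORT B =====
-- B: recursion on the suffix: skip a BIDGROUP row, or take the maximal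
-- non-BIDGROUP run, emit range(1, len(run)+1), and continue after the run.
def trip_index_list_creator_2_alt : List (String × String × String) → List Int
  | [] => []
  | x :: xs =>
    if x.2.2 == "\"BIDGROUP\"" then trip_index_list_creator_2_alt xs
    else
      let run := (x :: xs).takeWhile (fun it => it.2.2 != "\"BIDGROUP\"")
      PySem.List.pyRange 1 ((run.length : Int) + 1) 1 ++
        trip_index_list_creator_2_alt ((x :: xs).dropWhile (fun it => it.2.2 != "\"BIDGROUP\""))
termination_by l => l.length
decreasing_by
  · simp
  · rename_i h
    simp only [List.dropWhile]
    have hx : (x.2.2 != "\"BIDGROUP\"") = true := by simpa using h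
    rw [hx]
    simp only [List.length_cons]
    exact Nat.lt_succ_of_le (List.length_dropWhile_le _ _)

-- ===== PRECONDITION & SPEC =====
def Spec_trip_index_list_creator_2 (List_ : List (String × String × String)) (out : List Int) : Prop := out = trip_index_list_creator_2_alt List_
instance (List_ : List (String × String × String)) (out : List Int) : Decidable (Spec_trip_index_list_creator_2 List_ out) := by unfold Spec_trip_index_list_creator_2; infer_instance

-- ===== CLAIM (what is proved, stated in full; the proofs are below) =====
def Claim_equal_trip_index_list_creator_2 : Prop := ∀ (List_ : List (String × String × String)), Dom_trip_index_list_creator_2 List_ → Spec_trip_index_list_creator_2 List_ (trip_index_list_creator_2 List_)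

-- ===== LEMMAS AND PROOFS =====

-- the branch predicate: the row is not a BIDGROUP row
def pvP (it : String × String × String) : Bool := it.2.2 != "\"BIDGROUP\""

-- A's loop, state-recursively: output from counter c
def pvRun (c : Int) : List (String × String × String) → List Int
  | [] => []
  | x :: xs => if pvP x then (c + 1) :: pvRun (c + 1) xs else pvRun 0 xs

theorem pvFoldA (l : List (String × String × String)) :
    ∀ (acc : List Int) (c : Int),
    (l.foldl
      (fun (st : List Int × Int) item =>
        if item.2.2 != "\"BIDGROUP\"" then (st.1 ++ [st.2 + 1], st.2 + 1)
        else (st.1, (0 : Int)))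
      (acc, c)).1 = acc ++ pvRun c l := by
  induction l with
  | nil => intro acc c; simp [pvRun]
  | cons x xs ih =>
    intro acc c
    simp only [List.foldl_cons, pvRun, pvP]
    by_cases h : (x.2.2 != "\"BIDGROUP\"") = true
    · rw [if_pos h, if_pos h, ih]; simp
    · rw [if_neg h, if_neg h, ih]

theorem pvRunSplit (l : List (String × String × String)) :
    ∀ (c : Int),
    pvRun c l =
      PySem.List.pyRange (c + 1) (c + ((l.takeWhile pvP).length : Int) + 1) 1 ++
        pvRun 0 (l.dropWhile pvP) := by
  induction l with
  | nil =>
    intro c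
    rw [PySem.List.pyRange_one_eq_nil (by norm_num)]
    simp [pvRun]
  | cons x xs ih =>
    intro c
    by_cases h : pvP x = true
    · have htw : List.takeWhile pvP (x :: xs) = x :: List.takeWhile pvP xs := by
        simp [h]
      have hdw : List.dropWhile pvP (x :: xs) = List.dropWhile pvP xs := by
        simp [h]
      rw [htw, hdw]
      have hcons : PySem.List.pyRange (c + 1)
          (c + ((x :: List.takeWhile pvP xs).length : Int) + 1) 1 =
          (c + 1) :: PySem.List.pyRange (c + 1 + 1)
            (c + ((x :: List.takeWhile pvP xs).length : Int) + 1) 1 := by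
        apply PySem.List.pyRange_one_cons
        push_cast [List.length_cons]
        omega
      rw [hcons]
      have hb : c + ((x :: List.takeWhile pvP xs).length : Int) + 1 =
          (c + 1) + ((List.takeWhile pvP xs).length : Int) + 1 := by
        push_cast [List.length_cons]; ring
      rw [hb]
      simp only [pvRun, h, if_pos, List.cons_append]
      rw [ih (c + 1)]
    · have htw : List.takeWhile pvP (x :: xs) = [] := by
        simp [h]
      have hdw : List.dropWhile pvP (x :: xs) = x :: xs := by
        simp [h]
      rw [htw, hdw]
      rw [PySem.List.pyRange_one_eq_nil (by norm_num)]
      simp only [List.nil_append]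
      conv_lhs => rw [pvRun]
      conv_rhs => rw [pvRun]
      simp [h]

theorem pvRunAlt (l : List (String × String × String)) :
    pvRun 0 l = trip_index_list_creator_2_alt l := by
  induction l using trip_index_list_creator_2_alt.induct with
  | case1 => simp [pvRun, trip_index_list_creator_2_alt]
  | case2 x xs hbid ih =>
    have hp : pvP x = false := by simp [pvP]; simpa using hbid
    rw [trip_index_list_creator_2_alt]
    simp only [hbid, if_pos]
    rw [pvRun]
    simp [hp, ih]
  | case3 x xs hbid ih =>
    rw [trip_index_list_creator_2_alt]
    simp only [hbid, Bool.false_eq_true, reduceIte]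
    rw [pvRunSplit (x :: xs) 0]
    have hfun : (fun it : String × String × String => it.2.2 != "\"BIDGROUP\"") = pvP := rfl
    rw [hfun] at ih ⊢
    rw [ih]
    norm_num

theorem trip_index_list_creator_2_spec : Claim_equal_trip_index_list_creator_2 := by
  intro L _
  unfold Spec_trip_index_list_creator_2 trip_index_list_creator_2
  rw [pvFoldA, pvRunAlt]; rfl
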